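-- pv_equiv track=rewrite | github.com/Antoskacz/Testool | app.py | analyze_scenarios
-- ===== SOURCE A (Python) =====
-- def analyze_scenarios(scenarios: list):
--     """Count scenarios by segment -> channel -> action"""
--     segment_data = {"B2C": {"SHOP": {}, "IL": {}}, "B2B": {"SHOP": {}, "IL": {}}}
--
--     for scenario in scenarios:
--         segment = scenario.get("segment", "UNKNOWN")
--         channel = scenario.get("kanal", "UNKNOWN")
--         action = scenario.get("akce", "UNKNOWN")
--
--         if segment not in segment_data:
--             segment_data[segment] = {}
--
--         if channel not in segment_data[segment]:
--             segment_data[segment][channel] = {}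
--
--         if action not in segment_data[segment][channel]:
--             segment_data[segment][channel][action] = 0
--
--         segment_data[segment][channel][action] += 1
--
--     return segment_data
-- ===== SOURCE B (Python) =====
-- def analyze_scenarios(scenarios: list):
--     """Count scenarios by segment -> channel -> action"""
--     # Pass 1: flat counter keyed by (segment, channel, action) tuples.
--     counts = {}
--     for scenario in scenarios:
--         key = (scenario.get("segment", "UNKNOWN"),
--                scenario.get("kanal", "UNKNOWN"),
--                scenario.get("akce", "UNKNOWN"))
--         counts[key] = counts.get(key, 0) + 1
--
--     # Pass 2: expand the flat counter into the required nested skeleton.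
--     result = {"B2C": {"SHOP": {}, "IL": {}}, "B2B": {"SHOP": {}, "IL": {}}}
--     for (segment, channel, action), n in counts.items():
--         channels = result.setdefault(segment, {})
--         actions = channels.setdefault(channel, {})
--         actions[action] = n
--     return result
-- ===== Notes on version B (the rewrite author's own statement) =====
-- stated objective: alternative
-- what changed: B replaces A's single pass of guarded nested-dict mutations by two passes: a flat counter keyed by (segment, channel, action) tuples, then a reshape loop expanding the counter into the nested skeleton.
import Mathlib
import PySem

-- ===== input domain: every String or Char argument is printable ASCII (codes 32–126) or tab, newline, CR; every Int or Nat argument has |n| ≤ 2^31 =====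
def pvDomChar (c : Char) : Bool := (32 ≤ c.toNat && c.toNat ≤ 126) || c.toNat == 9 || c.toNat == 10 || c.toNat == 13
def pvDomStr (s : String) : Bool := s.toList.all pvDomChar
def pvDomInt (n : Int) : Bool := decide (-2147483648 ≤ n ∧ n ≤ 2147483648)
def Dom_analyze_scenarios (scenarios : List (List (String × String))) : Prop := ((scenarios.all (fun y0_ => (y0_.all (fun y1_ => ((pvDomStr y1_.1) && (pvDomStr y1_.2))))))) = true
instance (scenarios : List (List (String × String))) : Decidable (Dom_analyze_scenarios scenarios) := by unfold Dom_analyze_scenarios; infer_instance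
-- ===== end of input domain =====

-- B re-implements A with a flat (segment, channel, action) counter plus a reshape pass ('alternative' decomposition, same cost); return values proved equal on all inputs.

abbrev PvD3 := PySem.Dict String Int
abbrev PvD2 := PySem.Dict String PvD3
abbrev PvD1 := PySem.Dict String PvD2
abbrev PvKey := String × String × String

-- the literal skeleton {"B2C": {"SHOP": {}, "IL": {}}, "B2B": {"SHOP": {}, "IL": {}}} both Pythons start from
def pvSkel : PvD1 :=
  PySem.Dict.mk [("B2C", PySem.Dict.mk [("SHOP", PySem.Dict.mk []), ("IL", PySem.Dict.mk [])]),
                 ("B2B", PySem.Dict.mk [("SHOP", PySem.Dict.mk []), ("IL", PySem.Dict.mk [])])]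

-- the returned nested dict rendered as nested association lists (the task's return type)
def pvToLists (d : PvD1) : List (String × List (String × List (String × Int))) :=
  d.items.map (fun p => (p.1, p.2.items.map (fun q => (q.1, q.2.items))))

-- ===== PORT A =====
def analyze_scenarios (scenarios : List (List (String × String))) :
    List (String × List (String × List (String × Int))) :=
  let segment_data := scenarios.foldl (fun segment_data scenario =>
    -- scenario.get(k, "UNKNOWN"): first-match lookup per the dict-as-assoc-list convention
    let segment := (PySem.Dict.mk scenario).getD "segment" "UNKNOWN"
    let channel := (PySem.Dict.mk scenario).getD "kanal" "UNKNOWN"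
    let action  := (PySem.Dict.mk scenario).getD "akce" "UNKNOWN"
    let segment_data := if segment_data.contains segment then segment_data
                        else segment_data.insert segment (PySem.Dict.mk [])
    let d1 := segment_data.getD segment (PySem.Dict.mk [])   -- segment_data[segment]; key present here
    let d1 := if d1.contains channel then d1 else d1.insert channel (PySem.Dict.mk [])
    let d2 := d1.getD channel (PySem.Dict.mk [])             -- segment_data[segment][channel]; key present here
    let d2 := if d2.contains action then d2 else d2.insert action 0
    let d2 := d2.insert action (d2.getD action 0 + 1)        -- segment_data[segment][channel][action] += 1
    segment_data.insert segment (d1.insert channel d2)       -- write back the (in Python: aliased, mutated) inner dicts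
  ) pvSkel
  pvToLists segment_data

-- ===== PORT B =====
-- one item of the reshape loop: result.setdefault / setdefault / assignment, written back functionally
def pvExpandItem (result : PvD1) (it : PvKey × Int) : PvD1 :=
  let channels := result.getD it.1.1 (PySem.Dict.mk [])      -- channels = result.setdefault(segment, {})
  let actions  := channels.getD it.1.2.1 (PySem.Dict.mk [])  -- actions = channels.setdefault(channel, {})
  result.insert it.1.1 (channels.insert it.1.2.1 (actions.insert it.1.2.2 it.2))  -- actions[action] = n

def analyze_scenarios_alt (scenarios : List (List (String × String))) :
    List (String × List (String × List (String × Int))) :=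
  let counts : PySem.Dict PvKey Int := scenarios.foldl (fun counts scenario =>
    let key : PvKey := ((PySem.Dict.mk scenario).getD "segment" "UNKNOWN",
                        (PySem.Dict.mk scenario).getD "kanal" "UNKNOWN",
                        (PySem.Dict.mk scenario).getD "akce" "UNKNOWN")
    counts.insert key (counts.getD key 0 + 1)) (PySem.Dict.mk [])
  let result := counts.items.foldl pvExpandItem pvSkel
  pvToLists result

-- ===== PRECONDITION & SPEC =====
def Spec_analyze_scenarios (scenarios : List (List (String × String))) (out : List (String × List (String × List (String × Int)))) : Prop := out = analyze_scenarios_alt scenarios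
instance (scenarios : List (List (String × String))) (out : List (String × List (String × List (String × Int)))) : Decidable (Spec_analyze_scenarios scenarios out) := by unfold Spec_analyze_scenarios; infer_instance

-- ===== CLAIM (what is proved, stated in full; the proofs are below) =====
def Claim_equal_analyze_scenarios : Prop := ∀ (scenarios : List (List (String × String))), Dom_analyze_scenarios scenarios → Spec_analyze_scenarios scenarios (analyze_scenarios scenarios)

-- ===== LEMMAS AND PROOFS =====

-- A's loop body, factored over the extracted key triple
def pvStepA (r : PvD1) (t : PvKey) : PvD1 :=
  let r := if r.contains t.1 then r else r.insert t.1 (PySem.Dict.mk [])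
  let d1 := r.getD t.1 (PySem.Dict.mk [])
  let d1 := if d1.contains t.2.1 then d1 else d1.insert t.2.1 (PySem.Dict.mk [])
  let d2 := d1.getD t.2.1 (PySem.Dict.mk [])
  let d2 := if d2.contains t.2.2 then d2 else d2.insert t.2.2 0
  let d2 := d2.insert t.2.2 (d2.getD t.2.2 0 + 1)
  r.insert t.1 (d1.insert t.2.1 d2)

def pvKeyOf (scenario : List (String × String)) : PvKey :=
  ((PySem.Dict.mk scenario).getD "segment" "UNKNOWN",
   (PySem.Dict.mk scenario).getD "kanal" "UNKNOWN",
   (PySem.Dict.mk scenario).getD "akce" "UNKNOWN")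

-- B's counter update, factored over the key triple
def pvBump (c : PySem.Dict PvKey Int) (t : PvKey) : PySem.Dict PvKey Int :=
  c.insert t (c.getD t 0 + 1)

-- the count stored at the nested path of a triple (0 where the path is missing)
def pvVal3 (r : PvD1) (t : PvKey) : Int :=
  ((r.getD t.1 (PySem.Dict.mk [])).getD t.2.1 (PySem.Dict.mk [])).getD t.2.2 0

theorem pvA_eq (scenarios : List (List (String × String))) :
    analyze_scenarios scenarios = pvToLists ((scenarios.map pvKeyOf).foldl pvStepA pvSkel) := by
  rw [List.foldl_map]; rfl

theorem pvB_eq (scenarios : List (List (String × String))) :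
    analyze_scenarios_alt scenarios =
      pvToLists (((scenarios.map pvKeyOf).foldl pvBump (PySem.Dict.mk [])).items.foldl pvExpandItem pvSkel) := by
  rw [List.foldl_map]; rfl

theorem pvStepA_eq_expand (r : PvD1) (t : PvKey) :
    pvStepA r t = pvExpandItem r (t, pvVal3 r t + 1) := by
  obtain ⟨s, ch, a⟩ := t
  by_cases hs : r.contains s = true <;>
  · by_cases hc : ((if r.contains s then r else r.insert s (PySem.Dict.mk [])).getD s (PySem.Dict.mk [])).contains ch = true <;>
    · by_cases ha : (((if r.contains s then r else r.insert s (PySem.Dict.mk [])).getD s (PySem.Dict.mk [])).getD ch (PySem.Dict.mk [])).contains a = true <;>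
      simp_all [pvStepA, pvExpandItem, pvVal3, PySem.Dict.getD_of_not_contains,
            PySem.Dict.getD_insert_self, PySem.Dict.insert_insert_self]

def pvHas3 (r : PvD1) (t : PvKey) : Bool :=
  ((r.getD t.1 (PySem.Dict.mk [])).getD t.2.1 (PySem.Dict.mk [])).contains t.2.2

theorem pvVal3_expand (r : PvD1) (k t : PvKey) (n : Int) :
    pvVal3 (pvExpandItem r (k, n)) t = if k = t then n else pvVal3 r t := by
  obtain ⟨s, c, a⟩ := t; obtain ⟨s', c', a'⟩ := k
  by_cases h1 : s = s' <;> by_cases h2 : c = c' <;> by_cases h3 : a = a' <;>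
    simp_all [pvExpandItem, pvVal3, PySem.Dict.getD_insert, Prod.ext_iff] <;> tauto

theorem pvHas3_expand_self (r : PvD1) (k : PvKey) (n : Int) :
    pvHas3 (pvExpandItem r (k, n)) k = true := by
  obtain ⟨s', c', a'⟩ := k
  simp [pvExpandItem, pvHas3, PySem.Dict.getD_insert_self, PySem.Dict.contains_insert_self]

theorem pvHas3_expand_mono (r : PvD1) (k : PvKey) (n : Int) (t : PvKey) (h : pvHas3 r t = true) :
    pvHas3 (pvExpandItem r (k, n)) t = true := by
  obtain ⟨s, c, a⟩ := t; obtain ⟨s', c', a'⟩ := k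
  by_cases h1 : s = s' <;> by_cases h2 : c = c' <;> by_cases h3 : a = a' <;>
    simp_all [pvExpandItem, pvHas3, PySem.Dict.getD_insert, PySem.Dict.contains_insert]

theorem pvExpand_collapse (r : PvD1) (t : PvKey) (n w : Int) :
    pvExpandItem (pvExpandItem r (t, n)) (t, w) = pvExpandItem r (t, w) := by
  obtain ⟨s, c, a⟩ := t
  simp [pvExpandItem, PySem.Dict.getD_insert_self, PySem.Dict.insert_insert_self]

theorem pvInsert_comm_of_contains {κ ν : Type} [BEq κ] [LawfulBEq κ]
    (d : PySem.Dict κ ν) (k k' : κ) (v v' : ν)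
    (h : d.contains k = true) (hne : k' ≠ k) :
    (d.insert k v).insert k' v' = (d.insert k' v').insert k v := by
  apply PySem.Dict.ext
  have hbne : (k' == k) = false := by simp [hne]
  have hbne' : (k == k') = false := by simp [Ne.symm hne]
  by_cases h' : d.contains k' = true
  · rw [PySem.Dict.items_insert_of_contains _ v' (by rw [PySem.Dict.contains_insert]; simp [h']),
        PySem.Dict.items_insert_of_contains _ v h,
        PySem.Dict.items_insert_of_contains _ v (by rw [PySem.Dict.contains_insert]; simp [h]),
        PySem.Dict.items_insert_of_contains _ v' h', List.map_map, List.map_map]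
    apply List.map_congr_left
    intro p _
    by_cases hp : p.1 == k <;> by_cases hp' : p.1 == k' <;>
      simp_all [Function.comp]
  · have h'f : d.contains k' = false := by simpa using h'
    rw [PySem.Dict.items_insert_of_not_contains _ v'
          (by rw [PySem.Dict.contains_insert]; simp [h'f, hbne]),
        PySem.Dict.items_insert_of_contains _ v h,
        PySem.Dict.items_insert_of_contains _ v (by rw [PySem.Dict.contains_insert]; simp [h]),
        PySem.Dict.items_insert_of_not_contains _ v' h'f, List.map_append]
    simp [hbne]

theorem pvHas3_c2 (r : PvD1) (t : PvKey) (h : pvHas3 r t = true) :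
    (r.getD t.1 (PySem.Dict.mk [])).contains t.2.1 = true := by
  by_contra hf
  rw [Bool.not_eq_true] at hf
  rw [pvHas3, PySem.Dict.getD_of_not_contains _ _ hf] at h
  simp at h

theorem pvHas3_c1 (r : PvD1) (t : PvKey) (h : pvHas3 r t = true) :
    r.contains t.1 = true := by
  by_contra hf
  rw [Bool.not_eq_true] at hf
  have h2 := pvHas3_c2 r t h
  rw [PySem.Dict.getD_of_not_contains _ _ hf] at h2
  simp at h2

theorem pvExpand_comm (r : PvD1) (t k : PvKey) (w n : Int)
    (ht : pvHas3 r t = true) (hne : k ≠ t) :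
    pvExpandItem (pvExpandItem r (t, w)) (k, n) = pvExpandItem (pvExpandItem r (k, n)) (t, w) := by
  obtain ⟨s, c, a⟩ := t; obtain ⟨s', c', a'⟩ := k
  have hs := pvHas3_c1 r (s, c, a) ht
  have hc := pvHas3_c2 r (s, c, a) ht
  have ha : ((r.getD s (PySem.Dict.mk [])).getD c (PySem.Dict.mk [])).contains a = true := ht
  by_cases h1 : s' = s
  · subst h1
    by_cases h2 : c' = c
    · subst h2
      have h3 : a' ≠ a := by simpa [Prod.ext_iff] using hne
      simp only [pvExpandItem, PySem.Dict.getD_insert_self, PySem.Dict.insert_insert_self]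
      rw [pvInsert_comm_of_contains _ a a' w n ha h3]
    · have h2' : ¬ c = c' := fun e => h2 e.symm
      simp only [pvExpandItem, PySem.Dict.getD_insert_self, PySem.Dict.insert_insert_self,
        PySem.Dict.getD_insert, if_neg h2, if_neg h2']
      rw [pvInsert_comm_of_contains _ c c' _ _ hc h2]
  · have h1' : ¬ s = s' := fun e => h1 e.symm
    simp only [pvExpandItem, PySem.Dict.getD_insert, if_neg h1, if_neg h1']
    exact pvInsert_comm_of_contains r s s' _ _ hs h1

theorem pvHas3_foldl (l : List (PvKey × Int)) (r : PvD1) (t : PvKey)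
    (h : pvHas3 r t = true) : pvHas3 (l.foldl pvExpandItem r) t = true := by
  induction l generalizing r with
  | nil => exact h
  | cons x l ih => exact ih _ (by obtain ⟨k, n⟩ := x; exact pvHas3_expand_mono r k n t h)

theorem pvHas3_foldl_mem (l : List (PvKey × Int)) (r : PvD1) (t : PvKey)
    (h : t ∈ l.map Prod.fst) : pvHas3 (l.foldl pvExpandItem r) t = true := by
  induction l generalizing r with
  | nil => simp at h
  | cons x l ih =>
    obtain ⟨k, n⟩ := x
    simp only [List.map_cons, List.mem_cons] at h
    rcases h with h | h
    · cases h
      exact pvHas3_foldl l _ _ (pvHas3_expand_self r _ n)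
    · exact ih _ h

theorem pvVal3_foldl_not_mem (l : List (PvKey × Int)) (r : PvD1) (t : PvKey)
    (h : t ∉ l.map Prod.fst) : pvVal3 (l.foldl pvExpandItem r) t = pvVal3 r t := by
  induction l generalizing r with
  | nil => rfl
  | cons x l ih =>
    obtain ⟨k, n⟩ := x
    simp only [List.map_cons, List.mem_cons, not_or] at h
    rw [List.foldl_cons, ih _ h.2, pvVal3_expand, if_neg (fun e => h.1 e.symm)]

theorem pvVal3_foldl_mem (l : List (PvKey × Int)) (r : PvD1) (t : PvKey) (v : Int)
    (hn : (l.map Prod.fst).Nodup) (h : (t, v) ∈ l) :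
    pvVal3 (l.foldl pvExpandItem r) t = v := by
  induction l generalizing r with
  | nil => simp at h
  | cons x l ih =>
    obtain ⟨k, n⟩ := x
    simp only [List.map_cons, List.nodup_cons] at hn
    rcases List.mem_cons.mp h with h | h
    · injection h with h1 h2
      subst h1; subst h2
      rw [List.foldl_cons, pvVal3_foldl_not_mem l _ t hn.1, pvVal3_expand, if_pos rfl]
    · exact ih _ hn.2 h

theorem pvReplace_foldl (l : List (PvKey × Int)) (r : PvD1) (t : PvKey) (w : Int)
    (hn : (l.map Prod.fst).Nodup) (hm : t ∈ l.map Prod.fst) :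
    (l.map (fun p => if (p.1 == t) = true then (t, w) else p)).foldl pvExpandItem r =
      pvExpandItem (l.foldl pvExpandItem r) (t, w) := by
  induction l using List.reverseRecOn generalizing r with
  | nil => simp at hm
  | append_singleton l x ih =>
    obtain ⟨k, n⟩ := x
    rw [List.map_append, List.foldl_append, List.foldl_append]
    by_cases hk : k = t
    · have hnot : t ∉ l.map Prod.fst := by
        have hn2 := hn
        rw [List.map_append] at hn2
        have hd := List.disjoint_of_nodup_append hn2
        intro hmem
        exact hd hmem (by simp [hk])
      have hfx : (fun (p : PvKey × Int) => if (p.1 == t) = true then (t, w) else p) (k, n) = (t, w) := by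
        simp [hk]
      have hmapid : l.map (fun p => if (p.1 == t) = true then (t, w) else p) = l := by
        apply (List.map_congr_left ?_).trans (List.map_id l)
        intro p hp
        have : p.1 ≠ t := fun e => hnot (e ▸ List.mem_map_of_mem hp)
        simp [this]
      simp only [List.map_cons, List.map_nil, hfx, List.foldl_cons, List.foldl_nil, hmapid]
      rw [hk]
      exact (pvExpand_collapse _ t n w).symm
    · have hkb : ((k, n).1 == t) = false := by simp [hk]
      have hm' : t ∈ l.map Prod.fst := by
        simp only [List.map_append, List.mem_append] at hm
        rcases hm with hm | hm
        · exact hm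
        · have ht : t = k := by simpa using hm
          exact absurd ht.symm hk
      have hn' : (l.map Prod.fst).Nodup := by
        simp only [List.map_append, List.nodup_append] at hn
        exact hn.1
      simp only [List.map_cons, List.map_nil, hkb, Bool.false_eq_true, if_false,
        List.foldl_cons, List.foldl_nil]
      rw [ih _ hn' hm']
      exact pvExpand_comm _ t (k, n).1 w n (pvHas3_foldl_mem l r t hm') hk

theorem pvVal3_skel (t : PvKey) : pvVal3 pvSkel t = 0 := by
  obtain ⟨s, c, a⟩ := t
  simp only [pvVal3, pvSkel, PySem.Dict.getD_eq_get?_getD, PySem.Dict.get?_mk_cons]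
  split_ifs <;> (try simp [PySem.Dict.get?_mk_cons]) <;> (try split_ifs) <;> rfl

theorem pvMain (c : PySem.Dict PvKey Int) (t : PvKey) (hn : c.keys.Nodup) :
    pvStepA (c.items.foldl pvExpandItem pvSkel) t = (pvBump c t).items.foldl pvExpandItem pvSkel := by
  rw [pvStepA_eq_expand]
  have hkeys : c.keys = c.items.map Prod.fst := rfl
  by_cases hc : c.contains t = true
  · obtain ⟨v, hv⟩ : ∃ v, c.get? t = some v := by
      rw [PySem.Dict.contains_eq_isSome_get?] at hc
      exact Option.isSome_iff_exists.mp hc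
    have hmem := (PySem.Dict.get?_eq_some_iff_mem_items c t v hn).mp hv
    have hval : pvVal3 (c.items.foldl pvExpandItem pvSkel) t = v :=
      pvVal3_foldl_mem _ _ _ _ (hkeys ▸ hn) hmem
    have hgd : c.getD t 0 = v := PySem.Dict.getD_of_mem_items c hmem hn 0
    rw [pvBump, PySem.Dict.items_insert_of_contains c _ hc,
        pvReplace_foldl _ _ _ _ (hkeys ▸ hn) (hkeys ▸ (PySem.Dict.contains_iff_mem_keys c t).mp hc),
        hval, hgd]
  · have hcf : c.contains t = false := by simpa using hc
    have hnm : t ∉ c.items.map Prod.fst := by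
      rw [← hkeys]
      intro hm
      exact absurd ((PySem.Dict.contains_iff_mem_keys c t).mpr hm) (by simp [hcf])
    have hval : pvVal3 (c.items.foldl pvExpandItem pvSkel) t = 0 := by
      rw [pvVal3_foldl_not_mem _ _ _ hnm, pvVal3_skel]
    rw [pvBump, PySem.Dict.getD_of_not_contains _ _ hcf,
        PySem.Dict.items_insert_of_not_contains _ _ hcf, List.foldl_append]
    rw [hval, List.foldl_cons, List.foldl_nil]

theorem pvFold (ts : List PvKey) (c : PySem.Dict PvKey Int) (hn : c.keys.Nodup) :
    ts.foldl pvStepA (c.items.foldl pvExpandItem pvSkel) =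
      ((ts.foldl pvBump c).items).foldl pvExpandItem pvSkel := by
  induction ts generalizing c with
  | nil => rfl
  | cons t ts ih =>
    rw [List.foldl_cons, List.foldl_cons, pvMain c t hn]
    exact ih (pvBump c t) (PySem.Dict.nodup_keys_insert c t (c.getD t 0 + 1) hn)

-- ===== VERDICT (by name: the statement is the Claim_ definition above) =====
theorem analyze_scenarios_spec : Claim_equal_analyze_scenarios := by
  intro scenarios _
  show analyze_scenarios scenarios = analyze_scenarios_alt scenarios
  rw [pvA_eq, pvB_eq]
  exact congrArg pvToLists
    (pvFold (scenarios.map pvKeyOf) (PySem.Dict.mk []) List.nodup_nil)
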